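-- pv_equiv track=rewrite | github.com/nelsasser/QRStitcher | scanner.py | getVectorRatios
-- ===== SOURCE A (Python) =====
-- def getVectorRatios(vector):
-- 	# keep track of number of black and white pixels in the
-- 	# order they appear (compress vector)
-- 	vec_r = [[0], [0]];
-- 	i = 0
-- 	for p in vector:
-- 		# set color of first pixel in vector
-- 		if(i == 0):
-- 			vec_r[1][0] = int(p/255)
-- 			i = 1
--
-- 		# check if current pixel is same color as last pixel
-- 		if(vec_r[1][len(vec_r[1]) - 1] == int(p/255)):
-- 			# if it is same color, increase number
-- 			# of pixels of that color found in a row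
-- 			vec_r[0][len(vec_r[0]) - 1] += 1
-- 		else:
-- 			# if not same color
-- 			# switch to the new color
-- 			vec_r[0].append(1)
-- 			vec_r[1].append(int(p/255))
--
-- 	return vec_r
-- ===== SOURCE B (Python) =====
-- def getVectorRatios(vector):
--     # quantize once, then scan runs with two pointers
--     colors = [int(p / 255) for p in vector]
--     if not colors:
--         return [[0], [0]]
--     counts, vals = [], []
--     i, n = 0, len(colors)
--     while i < n:
--         c = colors[i]
--         j = i + 1
--         while j < n and colors[j] == c:
--             j += 1
--         counts.append(j - i)
--         vals.append(c)
--         i = j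
--     return [counts, vals]
-- ===== Notes on version B (the rewrite author's own statement) =====
-- stated objective: alternative
-- what changed: Replaces A's compare-to-previous accumulator with set/append on the tails of the two result lists by a quantize-once pass followed by a two-pointer run scan that emits each run's length and color directly.
import Mathlib
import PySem

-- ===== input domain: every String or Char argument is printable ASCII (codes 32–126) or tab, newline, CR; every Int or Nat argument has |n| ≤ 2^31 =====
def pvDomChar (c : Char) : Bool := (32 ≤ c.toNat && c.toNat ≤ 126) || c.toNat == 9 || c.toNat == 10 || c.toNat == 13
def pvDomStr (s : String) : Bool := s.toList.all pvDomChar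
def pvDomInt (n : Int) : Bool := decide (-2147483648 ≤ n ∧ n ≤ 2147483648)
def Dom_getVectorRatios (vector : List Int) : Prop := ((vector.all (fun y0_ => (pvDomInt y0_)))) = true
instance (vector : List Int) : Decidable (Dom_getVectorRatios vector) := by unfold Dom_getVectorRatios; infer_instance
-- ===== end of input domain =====

-- B does the same run-length encoding by a different decomposition (quantize once, then a run scan); same cost.

-- int(p/255): float division then truncation toward zero; exact as Int.tdiv on |p| ≤ 2^31 (the quotient stays far below 2^53, so the double rounding never crosses an integer).
def pvQuant (p : Int) : Int := Int.tdiv p 255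

-- ===== PORT A =====
-- one fold step of A's for-loop; state = ((vec_r[0], vec_r[1]), i)
def pvStepA (st : (List Int × List Int) × Int) (p : Int) : (List Int × List Int) × Int :=
  let cnts := st.1.1
  let cols := if st.2 == 0 then st.1.2.set 0 (pvQuant p) else st.1.2
  let i : Int := if st.2 == 0 then 1 else st.2
  if cols.getD (cols.length - 1) 0 == pvQuant p then
    ((cnts.set (cnts.length - 1) (cnts.getD (cnts.length - 1) 0 + 1), cols), i)
  else
    ((cnts ++ [1], cols ++ [pvQuant p]), i)

def getVectorRatios (vector : List Int) : List (List Int) :=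
  let st := vector.foldl pvStepA (([0], [0]), 0)
  [st.1.1, st.1.2]

-- ===== PORT B =====
-- length of the run of color c at the head (B's inner while loop over the remaining colors)
def pvRunLen (c : Int) : List Int → Nat
  | [] => 0
  | x :: xs => if x == c then pvRunLen c xs + 1 else 0

-- B's outer loop: emit (run length, color) and continue past the run
def pvRuns : List Int → List Int × List Int
  | [] => ([], [])
  | c :: rest =>
    let k := pvRunLen c rest
    let r := pvRuns (rest.drop k)
    (((k : Int) + 1) :: r.1, c :: r.2)
termination_by l => l.length
decreasing_by simp [List.length_drop]

def getVectorRatios_alt (vector : List Int) : List (List Int) :=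
  let colors := vector.map pvQuant
  match colors with
  | [] => [[0], [0]]
  | _ :: _ =>
    let r := pvRuns colors
    [r.1, r.2]

-- ===== PRECONDITION & SPEC =====
def Spec_getVectorRatios (vector : List Int) (out : List (List Int)) : Prop := out = getVectorRatios_alt vector
instance (vector : List Int) (out : List (List Int)) : Decidable (Spec_getVectorRatios vector out) := by unfold Spec_getVectorRatios; infer_instance

-- ===== CLAIM (what is proved, stated in full; the proofs are below) =====
def Claim_equal_getVectorRatios : Prop := ∀ (vector : List Int), Dom_getVectorRatios vector → Spec_getVectorRatios vector (getVectorRatios vector)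

-- ===== LEMMAS AND PROOFS =====

theorem pvGetD_concat (l : List Int) (a : Int) :
    (l ++ [a]).getD ((l ++ [a]).length - 1) 0 = a := by
  induction l with
  | nil => rfl
  | cons x xs ih => simp [ih]

theorem pvSet_concat (l : List Int) (a v : Int) :
    (l ++ [a]).set ((l ++ [a]).length - 1) v = l ++ [v] := by
  induction l with
  | nil => rfl
  | cons x xs ih => simp [ih]

-- after the first pixel, i = 1 forever and the step only appends/bumps at the tail
theorem pvStepA_one (s : List Int × List Int) (p : Int) :
    pvStepA (s, 1) p =
      (if s.2.getD (s.2.length - 1) 0 == pvQuant p then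
        (s.1.set (s.1.length - 1) (s.1.getD (s.1.length - 1) 0 + 1), s.2)
      else (s.1 ++ [1], s.2 ++ [pvQuant p]), 1) := by
  simp only [pvStepA]
  norm_num
  split <;> rfl

-- B's result for a head run of color c whose count so far is a
def pvRunsFrom (a : Int) (c : Int) (cs : List Int) : List Int × List Int :=
  let k := pvRunLen c cs
  let r := pvRuns (cs.drop k)
  ((a + (k : Int)) :: r.1, c :: r.2)

theorem pvRuns_cons (c : Int) (cs : List Int) : pvRuns (c :: cs) = pvRunsFrom 1 c cs := by
  simp [pvRuns, pvRunsFrom, add_comm]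

-- main invariant: folding A's step (with i = 1) from a tail state (… ++ [a], … ++ [c])
-- appends exactly the runs of the remaining colors
theorem pvFold_runs (cs : List Int) : ∀ (cnts cols : List Int) (a c : Int),
    cs.foldl pvStepA ((cnts ++ [a], cols ++ [c]), 1)
      = ((cnts ++ (pvRunsFrom a c (cs.map pvQuant)).1,
          cols ++ (pvRunsFrom a c (cs.map pvQuant)).2), 1) := by
  induction cs with
  | nil => intro cnts cols a c; simp [pvRunsFrom, pvRunLen, pvRuns]
  | cons p ps ih =>
    intro cnts cols a c
    rw [List.foldl_cons, pvStepA_one]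
    by_cases h : pvQuant p = c
    · rw [if_pos (by simp [h])]
      rw [pvGetD_concat, pvSet_concat, ih]
      have hr : pvRunsFrom a c ((p :: ps).map pvQuant) = pvRunsFrom (a + 1) c (ps.map pvQuant) := by
        simp only [List.map_cons, pvRunsFrom, pvRunLen, h, beq_self_eq_true, if_true,
          List.drop_succ_cons]
        congr 2
        push_cast; ring
      rw [hr]
    · rw [if_neg (by simp; exact fun hh => h hh.symm)]
      rw [show cnts ++ [a] ++ [(1:Int)] = (cnts ++ [a]) ++ [1] from rfl,
          show cols ++ [c] ++ [pvQuant p] = (cols ++ [c]) ++ [pvQuant p] from rfl, ih]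
      have hr : pvRunsFrom a c ((p :: ps).map pvQuant)
          = ((a :: (pvRunsFrom 1 (pvQuant p) (ps.map pvQuant)).1),
             (c :: (pvRunsFrom 1 (pvQuant p) (ps.map pvQuant)).2)) := by
        have hk : pvRunLen c ((p :: ps).map pvQuant) = 0 := by
          simp [pvRunLen, h]
        rw [pvRunsFrom.eq_def, hk]
        simp [pvRuns_cons, pvRunsFrom]
      rw [hr]
      simp

-- ===== VERDICT (by name: the statement is the Claim_ definition above) =====
theorem getVectorRatios_spec : Claim_equal_getVectorRatios := by
  intro vector _
  unfold Spec_getVectorRatios getVectorRatios getVectorRatios_alt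
  cases vector with
  | nil => rfl
  | cons p ps =>
    have h1 : pvStepA (([0], [0]), 0) p = ((([] : List Int) ++ [(1:Int)], ([] : List Int) ++ [pvQuant p]), 1) := by
      simp [pvStepA]
    rw [List.foldl_cons, h1, pvFold_runs]
    simp [pvRuns_cons]
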